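-- pv_equiv track=rewrite | github.com/arevalo-amigocare/zengarden-wrapped | zen_garden_weekly_auto.py | build_role_map
-- ===== SOURCE A (Python) =====
-- def build_role_map(users, roles_config):
--     """Build uid->role mapping from config roles and Slack user list."""
--     role_map = {}
--     for role_name, names in roles_config.items():
--         for rname in names:
--             for uid, uname in users.items():
--                 if uname.lower() == rname.lower():
--                     role_map[uid] = role_name
--     return role_map
-- ===== SOURCE B (Python) =====
-- def build_role_map(users, roles_config):
--     """Build uid->role mapping from config roles and Slack user list."""
--     index = {}
--     for uid, uname in users.items():
--         index.setdefault(uname.lower(), []).append(uid)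
--     return {uid: role_name
--             for role_name, names in roles_config.items()
--             for rname in names
--             for uid in index.get(rname.lower(), [])}
-- ===== Notes on version B (the rewrite author's own statement) =====
-- stated objective: faster
-- what changed: B indexes users once by lowercased name into a dict name->uids and looks each role name up, removing A's inner scan over all users for every role name.
import Mathlib
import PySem

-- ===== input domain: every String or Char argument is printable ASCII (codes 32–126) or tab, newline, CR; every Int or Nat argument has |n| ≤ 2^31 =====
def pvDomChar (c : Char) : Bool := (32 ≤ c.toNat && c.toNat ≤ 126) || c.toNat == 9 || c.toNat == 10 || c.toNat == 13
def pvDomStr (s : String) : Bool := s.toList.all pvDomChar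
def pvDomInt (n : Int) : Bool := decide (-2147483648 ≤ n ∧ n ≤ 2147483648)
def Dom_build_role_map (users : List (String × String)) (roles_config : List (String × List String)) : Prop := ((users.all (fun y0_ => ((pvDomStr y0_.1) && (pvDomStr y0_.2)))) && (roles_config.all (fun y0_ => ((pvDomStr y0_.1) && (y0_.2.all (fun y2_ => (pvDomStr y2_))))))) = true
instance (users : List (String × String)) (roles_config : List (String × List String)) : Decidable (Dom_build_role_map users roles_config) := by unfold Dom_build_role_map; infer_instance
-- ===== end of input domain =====

-- B replaces A's inner scan over all users per role name by a dict indexing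
-- lowercased usernames to uid lists, built once (objective: faster, asymptotic).

-- ===== PORT A =====
def build_role_map (users : List (String × String)) (roles_config : List (String × List String)) : List (String × String) :=
  (roles_config.foldl (fun rm rc =>
    rc.2.foldl (fun rm rname =>
      users.foldl (fun rm u =>
        if PySem.Str.lower u.2 == PySem.Str.lower rname then rm.insert u.1 rc.1 else rm) rm) rm)
    PySem.Dict.empty).items

-- ===== PORT B =====
-- index: lowered username -> list of uids, in user order ('setdefault(...,[]).append(uid)')
def brmIndex (users : List (String × String)) : PySem.Dict String (List String) :=
  users.foldl (fun idx u => idx.modify (PySem.Str.lower u.2) [] (· ++ [u.1])) PySem.Dict.empty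

def build_role_map_alt (users : List (String × String)) (roles_config : List (String × List String)) : List (String × String) :=
  let idx := brmIndex users
  (roles_config.foldl (fun rm rc =>
    rc.2.foldl (fun rm rname =>
      (idx.getD (PySem.Str.lower rname) []).foldl (fun rm uid => rm.insert uid rc.1) rm) rm)
    PySem.Dict.empty).items

-- ===== PRECONDITION & SPEC =====
def Spec_build_role_map (users : List (String × String)) (roles_config : List (String × List String)) (out : List (String × String)) : Prop := out = build_role_map_alt users roles_config
instance (users : List (String × String)) (roles_config : List (String × List String)) (out : List (String × String)) : Decidable (Spec_build_role_map users roles_config out) := by unfold Spec_build_role_map; infer_instance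

-- ===== CLAIM (what is proved, stated in full; the proofs are below) =====
def Claim_equal_build_role_map : Prop := ∀ (users : List (String × String)) (roles_config : List (String × List String)), Dom_build_role_map users roles_config → Spec_build_role_map users roles_config (build_role_map users roles_config)

-- ===== LEMMAS AND PROOFS =====

-- the index lookup is exactly the uids of the users whose lowered name is c
theorem brmIndex_getD (users : List (String × String)) (c : String) :
    (brmIndex users).getD c [] =
      (users.filter (fun u => PySem.Str.lower u.2 == c)).map (·.1) := by
  have h : brmIndex users =
      (users.map (fun u => (PySem.Str.lower u.2, u.1))).foldl
        (fun d p => d.modify p.1 [] (· ++ [p.2])) PySem.Dict.empty := by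
    simp [brmIndex, List.foldl_map]
  rw [h, PySem.Dict.getD_foldl_modify_append, List.filter_map, List.map_map]
  simp [Function.comp_def]

-- per role name, A's conditional scan over users = B's fold over the index lookup
theorem brm_inner (users : List (String × String)) (role rname : String)
    (rm : PySem.Dict String String) :
    users.foldl (fun rm u =>
        if PySem.Str.lower u.2 == PySem.Str.lower rname then rm.insert u.1 role else rm) rm =
    ((brmIndex users).getD (PySem.Str.lower rname) []).foldl
        (fun rm uid => rm.insert uid role) rm := by
  rw [brmIndex_getD, List.foldl_map]
  induction users generalizing rm with
  | nil => rfl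
  | cons u us ih =>
    simp only [List.foldl_cons, List.filter_cons]
    by_cases h : (PySem.Str.lower u.2 == PySem.Str.lower rname) = true
    · rw [if_pos h, if_pos h, List.foldl_cons]; exact ih _
    · rw [if_neg h, if_neg h]; exact ih _

-- ===== VERDICT (by name: the statement is the Claim_ definition above) =====
theorem build_role_map_spec : Claim_equal_build_role_map := by
  intro users roles_config _
  unfold Spec_build_role_map build_role_map build_role_map_alt
  congr 2
  funext rm rc
  congr 1
  funext rm rname
  exact brm_inner users rc.1 rname rm
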